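-- pv_equiv track=rewrite | github.com/blacksmithalex/Tinkoff_Generation | Tinkoff Generation 2022/1/code.py | update
-- ===== SOURCE A (Python) =====
-- def update(a, l):
--     'приводим список s символов строки ко всем одинаковм буквам l, возвращаем количество действий'
--     count = 0
--     while a.count(l) != len(a):
--         for i in range(len(a) - 1):
--             if a[i + 1] == l:
--                 a[i] = a[i + 1]
--         count += 1
--         a = a[:-1]
--     return count
-- ===== SOURCE B (Python) =====
-- def update(a, l):
--     # One reverse pass: each position's "fix time" is its distance to the nearest l
--     # at-or-to-its-right (or the distance until it is truncated off the end if none);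
--     # the answer is the maximum fix time.  Does not mutate a (A mutates its argument).
--     best = 0
--     cost = 0  # fix time of the position just to the right (0 past the end)
--     for x in reversed(a):
--         cost = 0 if x == l else cost + 1
--         best = max(best, cost)
--     return best
-- ===== Notes on version B (the rewrite author's own statement) =====
-- stated objective: faster
-- what changed: A repeatedly floods the list leftward and truncates it (a quadratic simulation of the process); B computes the answer directly in one reverse pass as the maximum over positions of the distance to the nearest l at-or-right of it (or the distance to past-the-end if none).
import Mathlib
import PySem

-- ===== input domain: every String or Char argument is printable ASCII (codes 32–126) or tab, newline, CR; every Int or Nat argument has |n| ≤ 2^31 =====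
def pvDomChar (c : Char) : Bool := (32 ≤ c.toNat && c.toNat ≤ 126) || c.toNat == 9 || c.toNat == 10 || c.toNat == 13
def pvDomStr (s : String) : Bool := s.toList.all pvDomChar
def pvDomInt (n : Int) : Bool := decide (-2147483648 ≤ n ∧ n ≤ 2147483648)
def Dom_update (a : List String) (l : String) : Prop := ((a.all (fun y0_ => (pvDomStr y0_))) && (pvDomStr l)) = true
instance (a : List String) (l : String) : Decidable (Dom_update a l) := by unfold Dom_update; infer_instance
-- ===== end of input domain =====

-- B replaces A's quadratic flood simulation by one reverse pass taking a running
-- maximum of each position's fix time (objective: faster, asymptotic).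
-- Note: A mutates its list argument in place during the first pass; B does not.
-- The equivalence proved here is about the RETURN value only.

-- ===== PORT A =====
-- inner 'for i in range(len(a) - 1): if a[i+1] == l: a[i] = a[i+1]'
-- (under the branch a[i+1] equals l, so the assigned value is written as l; exact)
def updateInner (a : List String) (l : String) : List String :=
  (PySem.List.pyRange 0 (PySem.List.len a - 1) 1).foldl
    (fun acc i => if PySem.List.pyGet? acc (i + 1) = some l then PySem.List.pySetD acc i l else acc) a

theorem updateInner_length (a : List String) (l : String) :
    (updateInner a l).length = a.length := by
  unfold updateInner
  generalize PySem.List.pyRange 0 (PySem.List.len a - 1) 1 = r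
  induction r generalizing a with
  | nil => rfl
  | cons i r ih =>
      simp only [List.foldl_cons]
      split
      · rw [ih (PySem.List.pySetD a i l)]
        exact PySem.List.length_pySetD a i l
      · exact ih a

-- the 'while' loop of A: state (a, count)
def updateGo (l : String) (a : List String) (count : Int) : Int :=
  if PySem.List.count a l ≠ PySem.List.len a then
    updateGo l (PySem.List.slice (updateInner a l) none (some (-1))) (count + 1)
  else count
termination_by a.length
decreasing_by
  rename_i h
  simp only [PySem.List.slice_to_neg_one, List.length_dropLast, updateInner_length]
  simp only [PySem.List.count_eq, PySem.List.len_eq, ne_eq] at h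
  have hle : a.count l ≤ a.length := List.count_le_length
  have : a ≠ [] := by rintro rfl; simp at h
  have : 0 < a.length := List.length_pos_of_ne_nil this
  omega

def update (a : List String) (l : String) : Int := updateGo l a 0

-- ===== PORT B =====
def update_alt (a : List String) (l : String) : Int :=
  (a.reverse.foldl
    (fun (st : Int × Int) x =>
      let cost := if x = l then 0 else st.2 + 1
      (max st.1 cost, cost)) (0, 0)).1

-- ===== PRECONDITION & SPEC =====
def Spec_update (a : List String) (l : String) (out : Int) : Prop := out = update_alt a l
instance (a : List String) (l : String) (out : Int) : Decidable (Spec_update a l out) := by unfold Spec_update; infer_instance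

-- ===== CLAIM (what is proved, stated in full; the proofs are below) =====
def Claim_equal_update : Prop := ∀ (a : List String) (l : String), Dom_update a l → Spec_update a l (update a l)

-- ===== LEMMAS AND PROOFS =====

-- G computes B's fold state structurally from the left: for each position, its
-- "fix time" (snd) and the running maximum of fix times (fst).
def G (l : String) : List String → Int × Int
  | [] => (0, 0)
  | x :: xs =>
      let c := if x = l then 0 else (G l xs).2 + 1
      (max (G l xs).1 c, c)

theorem alt_eq_G (a : List String) (l : String) : update_alt a l = (G l a).1 := by
  unfold update_alt
  suffices h : a.reverse.foldl
      (fun (st : Int × Int) x =>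
        let cost := if x = l then 0 else st.2 + 1
        (max st.1 cost, cost)) (0, 0) = G l a by rw [h]
  induction a with
  | nil => rfl
  | cons x xs ih =>
      simp only [List.reverse_cons, List.foldl_append, List.foldl_cons, List.foldl_nil, ih]
      rfl

theorem G_nonneg (l : String) (a : List String) : 0 ≤ (G l a).1 ∧ 0 ≤ (G l a).2 := by
  induction a with
  | nil => exact ⟨le_refl 0, le_refl 0⟩
  | cons x xs ih =>
      simp only [G]
      constructor
      · exact le_max_of_le_left ih.1
      · split <;> omega

theorem G_fst_zero_iff (l : String) (a : List String) :
    (G l a).1 = 0 ↔ ∀ x ∈ a, x = l := by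
  induction a with
  | nil => simp [G]
  | cons x xs ih =>
      have h := G_nonneg l xs
      simp only [G, List.mem_cons]
      by_cases hx : x = l
      · rw [if_pos hx]
        constructor
        · intro h0 y hy
          rcases hy with rfl | hy
          · exact hx
          · exact ih.mp (by omega) y hy
        · intro hall
          have h1 : (G l xs).1 = 0 := ih.mpr (fun y hy => hall y (Or.inr hy))
          omega
      · rw [if_neg hx]
        constructor
        · intro h0; omega
        · intro hall; exact absurd (hall x (Or.inl rfl)) hx

-- pure left-to-right step of A's inner pass: new[i] = l if a[i+1] = l else a[i]
def stepA (l : String) : List String → List String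
  | [] => []
  | [x] => [x]
  | x :: y :: t => (if y = l then l else x) :: stepA l (y :: t)

-- stepA followed by dropping the last element (= a[:-1] after the pass)
def stepD (l : String) : List String → List String
  | [] => []
  | [_] => []
  | x :: y :: t => (if y = l then l else x) :: stepD l (y :: t)

theorem stepA_length (l : String) (a : List String) : (stepA l a).length = a.length := by
  induction a with
  | nil => rfl
  | cons x xs ih =>
      cases xs with
      | nil => rfl
      | cons y t => simpa [stepA] using ih

theorem stepD_length (l : String) (a : List String) : (stepD l a).length = a.length - 1 := by
  induction a with
  | nil => rfl
  | cons x xs ih =>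
      cases xs with
      | nil => rfl
      | cons y t => simp [stepD, ih]

theorem inner_go (l : String) (rest : List String) : ∀ pre : List String,
    (PySem.List.pyRange (pre.length : Int) ((pre.length : Int) + rest.length - 1) 1).foldl
      (fun acc i => if PySem.List.pyGet? acc (i + 1) = some l then PySem.List.pySetD acc i l else acc)
      (pre ++ rest) = pre ++ stepA l rest := by
  induction rest with
  | nil =>
      intro pre
      rw [PySem.List.pyRange_one_eq_nil (by simp)]
      simp [stepA]
  | cons x xs ih =>
      cases xs with
      | nil =>
          intro pre
          rw [PySem.List.pyRange_one_eq_nil (by simp)]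
          simp [stepA]
      | cons y t =>
          intro pre
          rw [PySem.List.pyRange_one_cons (by simp; omega), List.foldl_cons]
          have hget : PySem.List.pyGet? (pre ++ x :: y :: t) ((pre.length : Int) + 1)
              = some y := by
            have h1 : ((pre.length : Int) + 1) = ((pre.length + 1 : Nat) : Int) := by push_cast; ring
            rw [h1, PySem.List.pyGet?_natCast, List.getElem?_append_right (by omega)]
            simp
          rw [hget]
          have hset : PySem.List.pySetD (pre ++ x :: y :: t) (pre.length : Int) l
              = pre ++ l :: y :: t := by
            rw [PySem.List.pySetD_natCast, List.set_append_right _ _ le_rfl]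
            simp
          by_cases hy : y = l
          · rw [if_pos (by rw [hy]), hset]
            have h2 : pre ++ l :: y :: t = (pre ++ [l]) ++ (y :: t) := by simp
            have h3 : ((pre.length : Int) + 1) = (((pre ++ [l]).length : Nat) : Int) := by
              push_cast [List.length_append, List.length_cons]; simp; try ring
            have h4 : ((pre.length : Int) + (x :: y :: t).length - 1)
                = (((pre ++ [l]).length : Int) + (y :: t).length - 1) := by
              push_cast [List.length_append, List.length_cons]; simp; try ring
            rw [h2, h3, h4, ih (pre ++ [l])]
            try simp [stepA, hy]
          · rw [if_neg (by simpa using hy)]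
            have h2 : pre ++ x :: y :: t = (pre ++ [x]) ++ (y :: t) := by simp
            have h3 : ((pre.length : Int) + 1) = (((pre ++ [x]).length : Nat) : Int) := by
              push_cast [List.length_append, List.length_cons]; simp; try ring
            have h4 : ((pre.length : Int) + (x :: y :: t).length - 1)
                = (((pre ++ [x]).length : Int) + (y :: t).length - 1) := by
              push_cast [List.length_append, List.length_cons]; simp; try ring
            rw [h2, h3, h4, ih (pre ++ [x])]
            try simp [stepA, hy]

theorem inner_eq_stepA (a : List String) (l : String) : updateInner a l = stepA l a := by
  have h := inner_go l a []
  simpa [updateInner, PySem.List.len_eq] using h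

theorem stepA_dropLast (l : String) (a : List String) :
    (stepA l a).dropLast = stepD l a := by
  induction a with
  | nil => rfl
  | cons x xs ih =>
      cases xs with
      | nil => rfl
      | cons y t =>
          have hne : stepA l (y :: t) ≠ [] := by
            intro h
            have := stepA_length l (y :: t)
            rw [h] at this
            simp at this
          simp only [stepA, stepD, List.dropLast_cons_of_ne_nil hne, ih]

-- one G-unfold step, applied selectively
theorem G_cons (l x : String) (xs : List String) :
    G l (x :: xs) = (max (G l xs).1 (if x = l then 0 else (G l xs).2 + 1),
                     if x = l then 0 else (G l xs).2 + 1) := rfl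

theorem G_stepD (l : String) (a : List String) :
    (G l (stepD l a)).1 = max ((G l a).1 - 1) 0 ∧
    (G l (stepD l a)).2 = max ((G l a).2 - 1) 0 := by
  induction a with
  | nil => simp [stepD, G]
  | cons x xs ih =>
      cases xs with
      | nil =>
          by_cases hx : x = l <;> simp [stepD, G, hx]
      | cons y t =>
          obtain ⟨ih1, ih2⟩ := ih
          have hcy : (G l (y :: t)).2 = if y = l then 0 else (G l t).2 + 1 := rfl
          have hn1 := G_nonneg l t
          have hn2 := G_nonneg l (y :: t)
          have hn3 := G_nonneg l (stepD l (y :: t))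
          show (G l ((if y = l then l else x) :: stepD l (y :: t))).1 = _ ∧
               (G l ((if y = l then l else x) :: stepD l (y :: t))).2 = _
          rw [G_cons, G_cons l x (y :: t)]
          by_cases hy : y = l <;> by_cases hx : x = l <;>
            simp only [hy, hx, reduceIte] at ih1 ih2 hn2 hn3 hcy ⊢ <;>
            constructor <;> omega

theorem count_len_iff (a : List String) (l : String) :
    (PySem.List.count a l = PySem.List.len a) ↔ ∀ x ∈ a, x = l := by
  simp only [PySem.List.count_eq, PySem.List.len_eq, Int.natCast_inj]
  rw [List.count_eq_length]
  constructor <;> intro h x hx <;> exact (h x hx).symm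

theorem updateGo_eq (l : String) (a : List String) (c : Int) :
    updateGo l a c = c + (G l a).1 := by
  suffices h : ∀ (n : Nat) (a : List String), a.length ≤ n → ∀ c, updateGo l a c = c + (G l a).1 from
    h a.length a le_rfl c
  intro n
  induction n with
  | zero =>
      intro a ha c
      have : a = [] := by cases a <;> simp_all
      subst this
      rw [updateGo]
      simp [PySem.List.count_eq, PySem.List.len_eq, G]
  | succ n ih =>
      intro a ha c
      rw [updateGo]
      split_ifs with h
      · rw [PySem.List.slice_to_neg_one, inner_eq_stepA, stepA_dropLast]
        rw [ih (stepD l a) (by rw [stepD_length]; omega) (c + 1)]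
        have h1 : (G l a).1 ≠ 0 := by
          rw [ne_eq, G_fst_zero_iff]
          intro hall
          exact h ((count_len_iff a l).mpr hall)
        have h2 := G_nonneg l a
        have h3 := (G_stepD l a).1
        omega
      · have h0 : (G l a).1 = 0 :=
          (G_fst_zero_iff l a).mpr ((count_len_iff a l).mp (not_not.mp h))
        omega

theorem update_spec' (a : List String) (l : String) : update a l = update_alt a l := by
  rw [update, updateGo_eq, alt_eq_G]; ring

-- ===== VERDICT (by name: the statement is the Claim_ definition above) =====
theorem update_spec : Claim_equal_update := by
  intro a l _
  unfold Spec_update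
  exact update_spec' a l
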